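-- pv_equiv track=rewrite | github.com/ianjoshi/green-code-analyzer | GreenCodeAnalyzer/data/tests/test_file_7.py | extract_ptcld
-- ===== SOURCE A (Python) =====
-- def extract_ptcld(single_frame):
--     ptcld=[]
--     for i in range(len(single_frame)): # Going through each row of frame
--         if single_frame[i][0]=="range": # Start of pt cld information
--             ptcld=[]
--         elif single_frame[i][0]=="TID":
--             break
--         else:
--             ptcld.append(single_frame[i])
--     return(ptcld)
-- ===== SOURCE B (Python) =====
-- def extract_ptcld(single_frame):
--     # Forward scan up to the first 'TID' row, then a backward scan to the
--     # last 'range' row: the answer is the segment between those boundaries.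
--     head = []
--     for row in single_frame:
--         if row[0] == "TID":
--             break
--         head.append(row)
--     tail = []
--     for row in reversed(head):
--         if row[0] == "range":
--             break
--         tail.append(row)
--     tail.reverse()
--     return tail
-- ===== Notes on version B (the rewrite author's own statement) =====
-- stated objective: alternative
-- what changed: Replaces A's reset-on-'range' accumulator loop with explicit boundary detection: a forward scan collecting rows up to the first 'TID' row, then a backward scan from its end to the last 'range' row, returning the segment between the two boundaries.
-- outside the precondition, e.g. on extract_ptcld([['x'], [], ['y']]): A raises IndexError, B raises IndexError
import Mathlib
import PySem

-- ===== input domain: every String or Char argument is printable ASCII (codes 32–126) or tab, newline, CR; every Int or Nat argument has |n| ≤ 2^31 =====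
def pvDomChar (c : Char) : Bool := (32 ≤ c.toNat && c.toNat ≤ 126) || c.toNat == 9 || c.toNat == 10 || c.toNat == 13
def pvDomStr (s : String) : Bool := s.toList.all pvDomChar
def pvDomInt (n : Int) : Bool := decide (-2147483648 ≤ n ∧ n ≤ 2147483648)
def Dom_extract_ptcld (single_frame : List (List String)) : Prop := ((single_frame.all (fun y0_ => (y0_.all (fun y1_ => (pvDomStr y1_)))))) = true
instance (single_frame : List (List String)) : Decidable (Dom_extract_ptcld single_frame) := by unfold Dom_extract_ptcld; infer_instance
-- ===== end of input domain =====

-- B replaces A's reset-on-'range' accumulator with explicit boundary detection: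
-- a forward scan to the first 'TID' row and a backward scan to the last 'range' row
-- (objective: alternative decomposition; same O(n) cost).
-- Python's row[0] is totalized as (pyGet? 0).getD ""; Pre_ excludes the inputs where it raises.

-- ===== PORT A =====
-- first element of a row, as Python's row[0] (default never used inside Pre_)
def pvHd (r : List String) : String := (PySem.List.pyGet? r 0).getD ""

def pvAGo : List (List String) → List (List String) → List (List String)
  | [], ptcld => ptcld
  | r :: rest, ptcld =>
    if pvHd r = "range" then pvAGo rest []
    else if pvHd r = "TID" then ptcld
    else pvAGo rest (ptcld ++ [r])

def extract_ptcld (single_frame : List (List String)) : List (List String) :=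
  pvAGo single_frame []

-- ===== PORT B =====
-- forward scan: rows before the first 'TID' row
def pvHead : List (List String) → List (List String)
  | [] => []
  | r :: rest => if pvHd r = "TID" then [] else r :: pvHead rest

-- backward scan (input already reversed): accumulate until a 'range' row
def pvBack : List (List String) → List (List String) → List (List String)
  | [], tail => tail
  | r :: rest, tail => if pvHd r = "range" then tail else pvBack rest (tail ++ [r])

def extract_ptcld_alt (single_frame : List (List String)) : List (List String) :=
  (pvBack (pvHead single_frame).reverse []).reverse

-- ===== PRECONDITION & SPEC =====
-- Pre_ excludes inputs on which Python A raises IndexError: an empty row occurring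
-- before the first 'TID' row (row[0] fails there); B raises identically.
def Pre_extract_ptcld (single_frame : List (List String)) : Prop :=
  ∀ r ∈ single_frame.takeWhile (fun r => !(r.head? == some "TID")), r ≠ []
instance (single_frame : List (List String)) : Decidable (Pre_extract_ptcld single_frame) := by
  unfold Pre_extract_ptcld; infer_instance

def pvWitness_extract_ptcld : List (List String) :=
  [["range", "0"], ["1", "2"], ["range"], ["3", "4"], ["5"], ["TID", "7"], []]

def Spec_extract_ptcld (single_frame : List (List String)) (out : List (List String)) : Prop := out = extract_ptcld_alt single_frame
instance (single_frame : List (List String)) (out : List (List String)) : Decidable (Spec_extract_ptcld single_frame out) := by unfold Spec_extract_ptcld; infer_instance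

-- ===== CLAIM (what is proved, stated in full; the proofs are below) =====
def Claim_equal_extract_ptcld : Prop := ∀ (single_frame : List (List String)), Dom_extract_ptcld single_frame → Pre_extract_ptcld single_frame → Spec_extract_ptcld single_frame (extract_ptcld single_frame)

-- ===== LEMMAS AND PROOFS =====

-- the tail segment B extracts from a given head prefix
def pvTailOf (head : List (List String)) : List (List String) :=
  (pvBack head.reverse []).reverse

theorem pvBack_no_range (l l' : List (List String)) (acc : List (List String))
    (h : ∀ y ∈ l, pvHd y ≠ "range") :
    pvBack (l ++ l') acc = pvBack l' (acc ++ l) := by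
  induction l generalizing acc with
  | nil => simp
  | cons r rest ih =>
    have hr : pvHd r ≠ "range" := h r (by simp)
    simp only [List.cons_append, pvBack, if_neg hr]
    rw [ih (acc ++ [r]) (fun y hy => h y (List.mem_cons_of_mem _ hy))]
    simp

theorem pvBack_has_range (l l' : List (List String)) (acc : List (List String))
    (h : ∃ y ∈ l, pvHd y = "range") :
    pvBack (l ++ l') acc = pvBack l acc := by
  induction l generalizing acc with
  | nil => simp at h
  | cons r rest ih =>
    simp only [List.cons_append, pvBack]
    by_cases hr : pvHd r = "range"
    · simp [hr]
    · simp only [if_neg hr]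
      apply ih
      rcases h with ⟨y, hy, hyr⟩
      rcases List.mem_cons.mp hy with h1 | h1
      · exact absurd (h1 ▸ hyr) hr
      · exact ⟨y, h1, hyr⟩

theorem pvMain (rows : List (List String)) (acc : List (List String)) :
    pvAGo rows acc =
      if ∀ y ∈ pvHead rows, pvHd y ≠ "range" then acc ++ pvTailOf (pvHead rows)
      else pvTailOf (pvHead rows) := by
  induction rows generalizing acc with
  | nil => simp [pvAGo, pvHead, pvTailOf, pvBack]
  | cons r rest ih =>
    by_cases htid : pvHd r = "TID"
    · have hh : pvHead (r :: rest) = [] := by simp [pvHead, htid]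
      rw [hh]; simp [pvAGo, htid, pvTailOf, pvBack]
    · have hh : pvHead (r :: rest) = r :: pvHead rest := by simp [pvHead, htid]
      have hrev : (r :: pvHead rest).reverse = (pvHead rest).reverse ++ [r] := by simp
      by_cases hrg : pvHd r = "range"
      · -- reset case: the 'range' row wipes the accumulator in A and bounds the slice in B
        simp only [pvAGo, if_pos hrg]
        have hne : ¬ (∀ y ∈ pvHead (r :: rest), pvHd y ≠ "range") := by
          intro h; exact h r (by rw [hh]; exact List.mem_cons_self) hrg
        rw [if_neg hne, ih]
        have htl : pvTailOf (pvHead (r :: rest)) = pvTailOf (pvHead rest) := by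
          rw [hh]; unfold pvTailOf; rw [hrev]
          by_cases hrest : ∀ y ∈ pvHead rest, pvHd y ≠ "range"
          · rw [pvBack_no_range _ _ _ (by simpa using hrest)]
            simp only [pvBack, if_pos hrg, List.nil_append]
            rw [show (pvHead rest).reverse = (pvHead rest).reverse ++ [] by simp,
                pvBack_no_range _ _ _ (by simpa using hrest)]
            simp [pvBack]
          · rw [pvBack_has_range _ _ _ (by
              push Not at hrest
              obtain ⟨y, hy, hyr⟩ := hrest
              exact ⟨y, by simpa using hy, hyr⟩)]
        by_cases hrest : ∀ y ∈ pvHead rest, pvHd y ≠ "range"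
        · rw [if_pos hrest, htl]; simp
        · rw [if_neg hrest, htl]
      · -- append case
        simp only [pvAGo, if_neg hrg, if_neg htid]
        rw [ih]
        have hmemeq : (∀ y ∈ pvHead (r :: rest), pvHd y ≠ "range") ↔
            (∀ y ∈ pvHead rest, pvHd y ≠ "range") := by
          rw [hh]
          constructor
          · intro h y hy; exact h y (List.mem_cons_of_mem _ hy)
          · intro h y hy
            rcases List.mem_cons.mp hy with h1 | h1
            · exact h1 ▸ hrg
            · exact h y h1
        by_cases hrest : ∀ y ∈ pvHead rest, pvHd y ≠ "range"
        · rw [if_pos hrest, if_pos (hmemeq.mpr hrest)]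
          have h1 : pvTailOf (pvHead (r :: rest)) = r :: pvTailOf (pvHead rest) := by
            rw [hh]; unfold pvTailOf
            rw [hrev, pvBack_no_range _ _ _ (by simpa using hrest)]
            simp only [pvBack, if_neg hrg, List.nil_append]
            rw [show (pvHead rest).reverse = (pvHead rest).reverse ++ [] by simp,
                pvBack_no_range _ _ _ (by simpa using hrest)]
            simp [pvBack]
          rw [h1]; simp
        · rw [if_neg hrest, if_neg (fun h => hrest (hmemeq.mp h))]
          have h1 : pvTailOf (pvHead (r :: rest)) = pvTailOf (pvHead rest) := by
            rw [hh]; unfold pvTailOf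
            rw [hrev, pvBack_has_range _ _ _ (by
              push Not at hrest
              obtain ⟨y, hy, hyr⟩ := hrest
              exact ⟨y, by simpa using hy, hyr⟩)]
          rw [h1]

-- ===== VERDICT (by name: the statement is the Claim_ definition above) =====
theorem extract_ptcld_spec : Claim_equal_extract_ptcld := by
  intro sf _ _
  show extract_ptcld sf = extract_ptcld_alt sf
  unfold extract_ptcld extract_ptcld_alt
  rw [pvMain]
  by_cases h : ∀ y ∈ pvHead sf, pvHd y ≠ "range"
  · rw [if_pos h]; simp [pvTailOf]
  · rw [if_neg h]; rfl
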